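-- pv_equiv track=rewrite | github.com/ehsanrs2/KetabMind | core/stego/huffman.py | applyEmbedding
-- ===== SOURCE A (Python) =====
-- from collections.abc import Sequence
--
-- MAPPING_TABLE: dict[str, str] = {
--     "000": "001",
--     "010": "011",
--     "100": "101",
--     "110": "111",
-- }
--
-- _REVERSE_MAPPING: dict[str, str] = {v: k for k, v in MAPPING_TABLE.items()}
--
-- _ALL_CODES = set(MAPPING_TABLE) | set(_REVERSE_MAPPING)
--
-- def findCandidates(codewords: Sequence[str]) -> list[int]:  # noqa: N802
--     """Return indices of codewords eligible for substitution.
--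
--     A codeword is considered a candidate if it exists in the mapping table
--     either as a ``0`` or ``1`` representation. The function returns the
--     indices of all such codewords within the provided sequence.
--     """
--
--     return [i for i, cw in enumerate(codewords) if cw in _ALL_CODES]
--
-- def applyEmbedding(codewords: Sequence[str], message_bits: str) -> list[str]:  # noqa: N802
--     """Embed ``message_bits`` into ``codewords`` using substitution.
--
--     Parameters
--     ----------
--     codewords:
--         Original sequence of Huffman codewords.
--     message_bits:
--         Binary string representing the message to embed.
--
--     Returns
--     -------
--     List[str]
--         New list of codewords with the message embedded.
--
--     Raises
--     ------
--     ValueError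
--         If ``message_bits`` is longer than the number of available
--         substitution candidates.
--     """
--
--     candidates = findCandidates(codewords)
--     if len(message_bits) > len(candidates):
--         msg = "Message too long for available candidates"
--         raise ValueError(msg)
--
--     result = list(codewords)
--     for bit, idx in zip(message_bits, candidates, strict=False):
--         current = result[idx]
--         if bit == "1":
--             # Swap to the paired codeword if we hold a ``0`` representation.
--             if current in MAPPING_TABLE:
--                 result[idx] = MAPPING_TABLE[current]
--         else:  # bit == "0"
--             # Ensure the codeword represents ``0``.
--             if current in _REVERSE_MAPPING:
--                 result[idx] = _REVERSE_MAPPING[current]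
--     return result
-- ===== SOURCE B (Python) =====
-- def applyEmbedding(codewords, message_bits):
--     """Embed message bits by forcing the last bit of each 3-bit binary codeword.
--
--     Every 3-character string over {'0','1'} is a substitution candidate, and the
--     mapping/reverse-mapping pair simply fixes its last character to the message
--     bit ('1' for bit '1', '0' for anything else). So no tables are needed.
--     """
--     bits = iter(message_bits)
--     _done = object()
--     result = []
--     for cw in codewords:
--         if len(cw) == 3 and all(c in "01" for c in cw):
--             b = next(bits, _done)
--             if b is _done:
--                 result.append(cw)
--             else:
--                 result.append(cw[:2] + ("1" if b == "1" else "0"))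
--         else:
--             result.append(cw)
--     if next(bits, _done) is not _done:
--         raise ValueError("Message too long for available candidates")
--     return result
-- ===== Notes on version B (the rewrite author's own statement) =====
-- stated objective: simpler
-- what changed: B drops the mapping/reverse-mapping dictionaries and the separate candidate-index pass: it observes that the candidates are exactly the 3-character binary strings and the substitution just forces the last character to the message bit, so it rebuilds the list in one streaming pass over the codewords consuming bits from an iterator.
import Mathlib
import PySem

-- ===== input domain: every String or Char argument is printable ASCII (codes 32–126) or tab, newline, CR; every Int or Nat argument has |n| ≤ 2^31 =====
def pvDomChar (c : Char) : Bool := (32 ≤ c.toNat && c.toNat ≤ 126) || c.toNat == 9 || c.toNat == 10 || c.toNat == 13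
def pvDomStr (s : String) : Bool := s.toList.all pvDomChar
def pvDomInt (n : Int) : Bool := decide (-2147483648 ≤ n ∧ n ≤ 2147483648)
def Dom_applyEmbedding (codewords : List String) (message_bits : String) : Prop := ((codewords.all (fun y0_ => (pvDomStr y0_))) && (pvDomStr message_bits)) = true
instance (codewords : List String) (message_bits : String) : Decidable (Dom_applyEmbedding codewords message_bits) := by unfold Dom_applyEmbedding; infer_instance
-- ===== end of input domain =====

-- B replaces A's mapping/reverse-mapping dictionaries and separate candidate-index pass by one
-- streaming pass that recognises 3-character binary codewords and overwrites their last
-- character with the message bit (objective: simpler).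

-- ===== PORT A =====
def pvMappingTable : PySem.Dict String String :=
  PySem.Dict.ofList [("000", "001"), ("010", "011"), ("100", "101"), ("110", "111")]

-- _REVERSE_MAPPING = {v: k for k, v in MAPPING_TABLE.items()}
def pvReverseMapping : PySem.Dict String String :=
  PySem.Dict.ofList ((PySem.Dict.items pvMappingTable).map (fun p => (p.2, p.1)))

-- _ALL_CODES = set(MAPPING_TABLE) | set(_REVERSE_MAPPING)
def pvAllCodes : PySem.Set String :=
  PySem.Set.union (PySem.Set.ofList (PySem.Dict.keys pvMappingTable)) (PySem.Dict.keys pvReverseMapping)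

def findCandidates (codewords : List String) : List Int :=
  (PySem.List.enumerate codewords 0).filterMap
    (fun p => if PySem.Set.contains pvAllCodes p.2 then some p.1 else none)

-- one iteration of A's `for bit, idx in zip(...)` loop; `result[idx]` / `result[idx] = v` are
-- always in range (idx comes from enumerate), so pyGet?/pySetD are exact here
def pvEmbStep (result : List String) (p : Char × Int) : List String :=
  match PySem.List.pyGet? result p.2 with
  | none => result
  | some current =>
    if p.1 == '1' then
      match PySem.Dict.get? pvMappingTable current with
      | some v => PySem.List.pySetD result p.2 v
      | none => result
    else
      match PySem.Dict.get? pvReverseMapping current with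
      | some v => PySem.List.pySetD result p.2 v
      | none => result

-- the ValueError when len(message_bits) > len(candidates) is excluded by Pre_applyEmbedding
def applyEmbedding (codewords : List String) (message_bits : String) : List String :=
  (message_bits.toList.zip (findCandidates codewords)).foldl pvEmbStep codewords

-- ===== PORT B =====
def pvIsCand (cw : String) : Bool :=
  cw.toList.length == 3 && cw.toList.all (fun c => c == '0' || c == '1')

-- B's single pass: returns the rebuilt list and the unconsumed message bits
-- (a nonempty leftover is B's ValueError case, excluded by Pre_applyEmbedding)
def pvGoB : List String → List Char → List String × List Char
  | [], bits => ([], bits)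
  | cw :: rest, bits =>
    if pvIsCand cw then
      match bits with
      | [] =>
        let r := pvGoB rest []
        (cw :: r.1, r.2)
      | b :: bs =>
        let r := pvGoB rest bs
        (String.ofList (PySem.List.slice cw.toList none (some 2) ++
          [if b == '1' then '1' else '0']) :: r.1, r.2)
    else
      let r := pvGoB rest bits
      (cw :: r.1, r.2)

def applyEmbedding_alt (codewords : List String) (message_bits : String) : List String :=
  (pvGoB codewords message_bits.toList).1

-- ===== PRECONDITION & SPEC =====
-- Pre_ excludes exactly the inputs where the Python A (and B) raises ValueError:
-- more message bits than candidate codewords (3-character strings over {'0','1'}).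
def Pre_applyEmbedding (codewords : List String) (message_bits : String) : Prop :=
  message_bits.toList.length ≤
    codewords.countP (fun cw => cw ∈ (["000", "001", "010", "011", "100", "101", "110", "111"] : List String))
instance (codewords : List String) (message_bits : String) : Decidable (Pre_applyEmbedding codewords message_bits) := by
  unfold Pre_applyEmbedding; infer_instance

def pvWitness_applyEmbedding : List String × String := (["010", "ab", "111", "000"], "10")

def Spec_applyEmbedding (codewords : List String) (message_bits : String) (out : List String) : Prop := out = applyEmbedding_alt codewords message_bits
instance (codewords : List String) (message_bits : String) (out : List String) : Decidable (Spec_applyEmbedding codewords message_bits out) := by unfold Spec_applyEmbedding; infer_instance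

-- ===== CLAIM (what is proved, stated in full; the proofs are below) =====
def Claim_equal_applyEmbedding : Prop := ∀ (codewords : List String) (message_bits : String), Dom_applyEmbedding codewords message_bits → Pre_applyEmbedding codewords message_bits → Spec_applyEmbedding codewords message_bits (applyEmbedding codewords message_bits)

-- ===== LEMMAS AND PROOFS =====

-- candidate indices of A, with the enumeration starting at s
def pvC (codewords : List String) (s : Int) : List Int :=
  (PySem.List.enumerate codewords s).filterMap
    (fun p => if PySem.Set.contains pvAllCodes p.2 then some p.1 else none)

lemma findCandidates_eq (codewords : List String) : findCandidates codewords = pvC codewords 0 := rfl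

lemma pvC_cons (cw : String) (rest : List String) (s : Int) :
    pvC (cw :: rest) s =
      if PySem.Set.contains pvAllCodes cw then s :: pvC rest (s + 1) else pvC rest (s + 1) := by
  by_cases h : cw ∈ pvAllCodes <;>
    simp [pvC, PySem.List.enumerate_cons, h]

lemma codes_lit : pvAllCodes = ["000", "010", "100", "110", "001", "011", "101", "111"] := by decide

lemma mem_codes_iff (cw : String) :
    cw ∈ pvAllCodes ↔ cw.toList ∈ ([['0','0','0'], ['0','1','0'], ['1','0','0'], ['1','1','0'],
      ['0','0','1'], ['0','1','1'], ['1','0','1'], ['1','1','1']] : List (List Char)) := by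
  rw [codes_lit]
  simp only [List.mem_cons, List.not_mem_nil, or_false, ← String.toList_inj,
    (by decide : ("000" : String).toList = ['0','0','0']),
    (by decide : ("010" : String).toList = ['0','1','0']),
    (by decide : ("100" : String).toList = ['1','0','0']),
    (by decide : ("110" : String).toList = ['1','1','0']),
    (by decide : ("001" : String).toList = ['0','0','1']),
    (by decide : ("011" : String).toList = ['0','1','1']),
    (by decide : ("101" : String).toList = ['1','0','1']),
    (by decide : ("111" : String).toList = ['1','1','1'])]

-- membership in A's code set coincides with B's structural candidate test
lemma cand_eq (cw : String) : PySem.Set.contains pvAllCodes cw = pvIsCand cw := by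
  have h := mem_codes_iff cw
  rcases hl : cw.toList with _ | ⟨a, _ | ⟨b, _ | ⟨c, _ | ⟨d, l⟩⟩⟩⟩ <;>
    simp [pvIsCand, hl, h] <;>
    · by_cases ha0 : a = '0' <;> by_cases ha1 : a = '1' <;>
      by_cases hb0 : b = '0' <;> by_cases hb1 : b = '1' <;>
      by_cases hc0 : c = '0' <;> by_cases hc1 : c = '1' <;>
      simp_all

-- for a candidate codeword, A's table substitution equals B's last-character overwrite
lemma step_val (cw : String) (hc : pvIsCand cw = true) (b : Char) :
    (if b == '1' then
      match PySem.Dict.get? pvMappingTable cw with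
      | some v => v
      | none => cw
    else
      match PySem.Dict.get? pvReverseMapping cw with
      | some v => v
      | none => cw) =
    String.ofList (PySem.List.slice cw.toList none (some 2) ++ [if b == '1' then '1' else '0']) := by
  have hmem : cw ∈ pvAllCodes := by
    have h2 : PySem.Set.contains pvAllCodes cw = true := (cand_eq cw).trans hc
    simpa using h2
  rw [codes_lit] at hmem
  simp only [List.mem_cons, List.not_mem_nil, or_false] at hmem
  rcases hmem with h|h|h|h|h|h|h|h <;> subst h <;> cases hb : b == '1' <;> simp [hb] <;> decide

lemma pvGoB_nil_bits (l : List String) : pvGoB l [] = (l, []) := by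
  induction l with
  | nil => rfl
  | cons cw rest ih => by_cases h : pvIsCand cw = true <;> simp [pvGoB, h, ih]

-- A's loop body, applied at the index just past the processed prefix
lemma embStep_cand (pre rest : List String) (cw : String) (b : Char) (hc : pvIsCand cw = true) :
    pvEmbStep (pre ++ cw :: rest) (b, (pre.length : Int)) =
      pre ++ String.ofList (PySem.List.slice cw.toList none (some 2) ++
        [if b == '1' then '1' else '0']) :: rest := by
  have hset : ∀ v : String,
      PySem.List.pySetD (pre ++ cw :: rest) ((pre.length : Nat) : Int) v = pre ++ v :: rest := by
    intro v; rw [PySem.List.pySetD_natCast]; simp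
  have hres : pvEmbStep (pre ++ cw :: rest) (b, (pre.length : Int)) =
      PySem.List.pySetD (pre ++ cw :: rest) ((pre.length : Nat) : Int)
        (if b == '1' then (match PySem.Dict.get? pvMappingTable cw with | some v => v | none => cw)
         else (match PySem.Dict.get? pvReverseMapping cw with | some v => v | none => cw)) := by
    unfold pvEmbStep
    rw [PySem.List.pyGet?_append_length]
    cases hb : b == '1' <;> simp only [hb, Bool.false_eq_true, ite_false, ite_true] <;>
    · rcases hg : PySem.Dict.get? _ cw with _ | v <;> simp [hg, hset]
  rw [hres, hset, step_val cw hc b]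

-- the loop invariant: with prefix `pre` already built, A's fold over the remaining candidate
-- indices produces exactly B's streaming result
lemma main_lemma (cws : List String) :
    ∀ (bits : List Char) (pre : List String),
      (bits.zip (pvC cws (pre.length : Int))).foldl pvEmbStep (pre ++ cws) =
        pre ++ (pvGoB cws bits).1 := by
  induction cws with
  | nil => intro bits pre; simp [pvC, pvGoB, PySem.List.enumerate_nil]
  | cons cw rest ih =>
    intro bits pre
    rw [pvC_cons, cand_eq]
    by_cases hc : pvIsCand cw = true
    · cases bits with
      | nil => simp [pvGoB, hc, pvGoB_nil_bits]
      | cons b bs =>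
        simp only [hc, if_true]
        rw [List.zip_cons_cons, List.foldl_cons, embStep_cand pre rest cw b hc]
        have h := ih bs (pre ++ [String.ofList (PySem.List.slice cw.toList none (some 2) ++
          [if b == '1' then '1' else '0'])])
        simp only [List.length_append, List.length_cons, List.length_nil, Nat.cast_add,
          Nat.cast_one, zero_add] at h
        simp [pvGoB, hc]
        simpa using h
    · simp only [hc, Bool.false_eq_true, ite_false]
      have h := ih bits (pre ++ [cw])
      simp only [List.length_append, List.length_cons, List.length_nil, Nat.cast_add,
        Nat.cast_one, zero_add] at h
      simp [pvGoB, hc]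
      simpa using h

theorem applyEmbedding_eq_alt (codewords : List String) (message_bits : String) :
    applyEmbedding codewords message_bits = applyEmbedding_alt codewords message_bits := by
  have h := main_lemma codewords message_bits.toList []
  simpa [applyEmbedding, applyEmbedding_alt, findCandidates_eq] using h

-- ===== VERDICT (by name: the statement is the Claim_ definition above) =====
theorem applyEmbedding_spec : Claim_equal_applyEmbedding := by
  intro codewords message_bits _ _
  unfold Spec_applyEmbedding
  exact applyEmbedding_eq_alt codewords message_bits
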